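-- pv_equiv track=rewrite | github.com/TISANTANA1962/tda | 1-guia/codigos-1/ej-3/codigo1-1.py | leftiano
-- ===== SOURCE A (Python) =====
-- def leftiano(input: list[int]) -> bool:
--     if len(input) < 2:
--         return True
--
--     medio: int = len(input) // 2
--
--     if medio == 1:
--         return input[0] > input[1]
--
--     izq: list[int] = input[:medio]
--     der: list[int] = input[medio:]
--
--     if sum(izq) > sum(der):
--         return leftiano(izq)
--     else:
--         return False
-- ===== SOURCE B (Python) =====
-- def leftiano(input: list[int]) -> bool:
--     n = len(input)
--     if n < 2:
--         return True
--     # one pass of prefix sums; then walk the halving chain using O(1) lookups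
--     pref = [0]
--     s = 0
--     for x in input:
--         s += x
--         pref.append(s)
--     m = n
--     while m // 2 >= 2:
--         if 2 * pref[m // 2] <= pref[m]:
--             return False
--         m = m // 2
--     return input[0] > input[1]
-- ===== Notes on version B (the rewrite author's own statement) =====
-- stated objective: alternative
-- what changed: Replaces A's recursion that re-slices the list and recomputes sums at every level by a single prefix-sum pass followed by an iterative walk down the halving chain using O(1) lookups.
import Mathlib
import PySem

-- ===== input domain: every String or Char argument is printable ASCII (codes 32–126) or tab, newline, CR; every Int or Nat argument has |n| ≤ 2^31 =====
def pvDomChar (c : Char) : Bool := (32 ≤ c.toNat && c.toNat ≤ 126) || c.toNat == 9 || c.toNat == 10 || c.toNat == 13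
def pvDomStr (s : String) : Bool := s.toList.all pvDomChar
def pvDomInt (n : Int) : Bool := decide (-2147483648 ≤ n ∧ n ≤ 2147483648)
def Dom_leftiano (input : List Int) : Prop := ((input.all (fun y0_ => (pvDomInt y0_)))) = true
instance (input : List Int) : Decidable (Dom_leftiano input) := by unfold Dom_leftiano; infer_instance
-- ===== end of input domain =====

-- B replaces A's recursion-with-repeated-slicing-and-summing by one prefix-sum pass plus a
-- loop over the halving chain with O(1) sum lookups (objective: alternative decomposition).

-- floordiv of a Nat cast by 2 (used by PORT A's decreasing_by)
theorem floordiv_two_nat (n : Nat) : PySem.Int.floordiv (n : Int) 2 = ((n / 2 : Nat) : Int) :=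
  by exact_mod_cast PySem.Int.floordiv_natCast n 2

-- ===== PORT A =====
def leftiano (input : List Int) : Bool :=
  if input.length < 2 then true
  else
    let medio : Int := PySem.Int.floordiv (input.length : Int) 2
    if medio = 1 then
      PySem.List.pyGetD input 0 0 > PySem.List.pyGetD input 1 0
    else
      let izq := PySem.List.slice input none (some medio)
      let der := PySem.List.slice input (some medio) none
      if izq.sum > der.sum then leftiano izq else false
termination_by input.length
decreasing_by
  simp only [floordiv_two_nat, PySem.List.slice_to_natCast, List.length_take]
  omega

-- ===== PORT B =====
-- the `while m // 2 >= 2` loop of Source B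
def leftianoLoop (input pref : List Int) (m : Nat) : Bool :=
  if 2 ≤ m / 2 then
    if 2 * PySem.List.pyGetD pref ((m / 2 : Nat) : Int) 0 ≤ PySem.List.pyGetD pref ((m : Nat) : Int) 0 then
      false
    else
      leftianoLoop input pref (m / 2)
  else
    PySem.List.pyGetD input 0 0 > PySem.List.pyGetD input 1 0
termination_by m
decreasing_by omega

def leftiano_alt (input : List Int) : Bool :=
  if input.length < 2 then true
  else
    let ps := input.foldl (fun (acc : List Int × Int) x => (acc.1 ++ [acc.2 + x], acc.2 + x)) ([0], 0)
    leftianoLoop input ps.1 input.length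

-- ===== PRECONDITION & SPEC =====
def Spec_leftiano (input : List Int) (out : Bool) : Prop := out = leftiano_alt input
instance (input : List Int) (out : Bool) : Decidable (Spec_leftiano input out) := by unfold Spec_leftiano; infer_instance

-- ===== CLAIM (what is proved, stated in full; the proofs are below) =====
def Claim_equal_leftiano : Prop := ∀ (input : List Int), Dom_leftiano input → Spec_leftiano input (leftiano input)

-- ===== LEMMAS AND PROOFS =====

/-- The list of prefix sums of `xs` (length `xs.length + 1`, starting with 0). -/
def prefSums (xs : List Int) : List Int :=
  (List.range (xs.length + 1)).map (fun k => (xs.take k).sum)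

theorem prefSums_append_singleton (done : List Int) (x : Int) :
    prefSums (done ++ [x]) = prefSums done ++ [done.sum + x] := by
  unfold prefSums
  rw [List.length_append, List.length_singleton, List.range_succ, List.map_append]
  congr 1
  · apply List.map_congr_left
    intro k hk
    rw [List.mem_range] at hk
    rw [List.take_append_of_le_length (by omega)]
  · simp

theorem fold_prefSums (l : List Int) : ∀ (done : List Int),
    l.foldl (fun (acc : List Int × Int) x => (acc.1 ++ [acc.2 + x], acc.2 + x)) (prefSums done, done.sum)
      = (prefSums (done ++ l), (done ++ l).sum) := by
  induction l with
  | nil => intro done; simp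
  | cons x xs ih =>
    intro done
    rw [List.foldl_cons]
    have h1 : (prefSums done ++ [done.sum + x], done.sum + x)
        = (prefSums (done ++ [x]), (done ++ [x]).sum) := by
      rw [prefSums_append_singleton]; simp
    simp only [h1]
    rw [ih (done ++ [x])]
    simp

theorem prefSums_get (xs : List Int) (k : Nat) (hk : k ≤ xs.length) :
    PySem.List.pyGetD (prefSums xs) (k : Int) 0 = (xs.take k).sum := by
  rw [PySem.List.pyGetD_natCast]
  unfold prefSums
  rw [List.getD_eq_getElem?_getD, List.getElem?_map, List.getElem?_range (by omega)]
  simp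

theorem take_sum_split (xs : List Int) (a b : Nat) (hab : a ≤ b) :
    ((xs.take b).drop a).sum = (xs.take b).sum - (xs.take a).sum := by
  have h : xs.take a ++ (xs.take b).drop a = xs.take b := by
    have ha : xs.take a = (xs.take b).take a := by
      rw [List.take_take, Nat.min_eq_left hab]
    rw [ha, List.take_append_drop]
  have := congrArg List.sum h
  rw [List.sum_append] at this
  omega

theorem loop_eq (input : List Int) : ∀ (m : Nat), 2 ≤ m → m ≤ input.length →
    leftiano (input.take m) = leftianoLoop input (prefSums input) m := by
  intro m
  induction m using Nat.strong_induction_on with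
  | _ m ih =>
    intro h2 hle
    have hlen : (input.take m).length = m := by
      rw [List.length_take]; omega
    rw [leftiano.eq_def, leftianoLoop.eq_def]
    simp only [hlen, floordiv_two_nat]
    by_cases hmid : 2 ≤ m / 2
    · -- recursive / looping case
      have hne : ((m / 2 : Nat) : Int) ≠ 1 := by omega
      rw [if_neg (by omega), if_neg hne, if_pos hmid]
      simp only [PySem.List.slice_to_natCast, PySem.List.slice_from_natCast,
        List.take_take, Nat.min_eq_left (by omega : m / 2 ≤ m)]
      rw [prefSums_get input (m / 2) (by omega), prefSums_get input m hle,
        take_sum_split input (m / 2) m (by omega)]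
      by_cases hc : (input.take (m / 2)).sum > (input.take m).sum - (input.take (m / 2)).sum
      · rw [if_pos hc, if_neg (by omega)]
        exact ih (m / 2) (by omega) hmid (by omega)
      · rw [if_neg hc, if_pos (by omega)]
    · -- base case: m // 2 = 1, i.e. m = 2 or m = 3
      have h1 : ((m / 2 : Nat) : Int) = 1 := by omega
      rw [if_neg (by omega), if_pos h1, if_neg hmid]
      have g0 : PySem.List.pyGetD (input.take m) 0 0 = PySem.List.pyGetD input 0 0 := by
        have : ((0 : Nat) : Int) = (0 : Int) := rfl
        rw [← this, PySem.List.pyGetD_natCast, PySem.List.pyGetD_natCast,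
          List.getD_eq_getElem?_getD, List.getD_eq_getElem?_getD,
          List.getElem?_take_of_lt (by omega)]
      have g1 : PySem.List.pyGetD (input.take m) 1 0 = PySem.List.pyGetD input 1 0 := by
        have : ((1 : Nat) : Int) = (1 : Int) := rfl
        rw [← this, PySem.List.pyGetD_natCast, PySem.List.pyGetD_natCast,
          List.getD_eq_getElem?_getD, List.getD_eq_getElem?_getD,
          List.getElem?_take_of_lt (by omega)]
      rw [g0, g1]

-- ===== VERDICT (by name: the statement is the Claim_ definition above) =====
theorem leftiano_spec : Claim_equal_leftiano := by
  intro input _h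
  unfold Spec_leftiano leftiano_alt
  by_cases hlen : input.length < 2
  · rw [leftiano.eq_def, if_pos hlen, if_pos hlen]
  · rw [if_neg hlen]
    have hfold := fold_prefSums input []
    have hpre : prefSums [] = [0] := by decide
    rw [hpre] at hfold
    simp only [List.sum_nil, List.nil_append] at hfold
    simp only [hfold]
    rw [← loop_eq input input.length (by omega) le_rfl, List.take_length]
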